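-- pv_equiv track=rewrite | github.com/NaveeN-929/prompt-engine | pam-service/app/core/context_evaluator.py | _check_transaction_tags
-- ===== SOURCE A (Python) =====
-- def _check_transaction_tags(values, transactions, profile, input_data, now):
--     if not isinstance(values, list):
--         return False
--     for tx in transactions:
--         tx_tags = tx.get("tags", [])
--         if any(tag in tx_tags for tag in values):
--             return True
--     return False
-- ===== SOURCE B (Python) =====
-- def _check_transaction_tags(values, transactions, profile, input_data, now):
--     if not isinstance(values, list):
--         return False
--     all_tags = set()
--     for tx in transactions:
--         all_tags.update(tx.get("tags", []))
--     return not all_tags.isdisjoint(values)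
-- ===== Notes on version B (the rewrite author's own statement) =====
-- stated objective: faster
-- what changed: Replaces the nested per-transaction short-circuit membership scan over values with a single pass building one set of all tags seen, followed by one set disjointness test against values.
import Mathlib
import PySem

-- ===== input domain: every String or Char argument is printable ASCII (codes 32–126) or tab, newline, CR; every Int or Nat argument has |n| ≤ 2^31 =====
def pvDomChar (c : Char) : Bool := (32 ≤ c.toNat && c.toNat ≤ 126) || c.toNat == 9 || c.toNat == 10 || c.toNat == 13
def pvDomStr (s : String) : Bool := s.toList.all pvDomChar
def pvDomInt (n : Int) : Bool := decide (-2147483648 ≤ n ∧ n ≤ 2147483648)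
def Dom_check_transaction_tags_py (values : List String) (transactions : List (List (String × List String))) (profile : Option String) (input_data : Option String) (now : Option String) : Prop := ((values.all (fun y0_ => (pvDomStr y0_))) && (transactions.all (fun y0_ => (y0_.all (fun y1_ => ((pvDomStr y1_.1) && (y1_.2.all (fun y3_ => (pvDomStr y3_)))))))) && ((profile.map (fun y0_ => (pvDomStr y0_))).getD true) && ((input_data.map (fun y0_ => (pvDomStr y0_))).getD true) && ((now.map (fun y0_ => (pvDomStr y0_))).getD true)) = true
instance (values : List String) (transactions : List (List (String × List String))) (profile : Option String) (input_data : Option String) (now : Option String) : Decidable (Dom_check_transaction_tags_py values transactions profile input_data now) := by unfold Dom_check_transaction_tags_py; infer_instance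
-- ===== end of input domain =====

-- B replaces the nested per-transaction short-circuit scan by one pass building a set of all tags, then one disjointness test (simpler).
-- ===== PORT A =====
-- the 'for tx in transactions: … return True' loop of A
def checkTagsLoopA (values : List String) : List (List (String × List String)) → Bool
  | [] => false
  | tx :: rest =>
      let tx_tags := PySem.Dict.getD (PySem.Dict.mk tx) "tags" []
      if values.any (fun tag => tx_tags.contains tag) then true
      else checkTagsLoopA values rest

def check_transaction_tags_py (values : List String) (transactions : List (List (String × List String))) (profile : Option String) (input_data : Option String) (now : Option String) : Bool :=
  checkTagsLoopA values transactions

-- ===== PORT B =====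
def check_transaction_tags_py_alt (values : List String) (transactions : List (List (String × List String))) (profile : Option String) (input_data : Option String) (now : Option String) : Bool :=
  let all_tags : PySem.Set String :=
    transactions.foldl (fun s tx => PySem.Set.update s (PySem.Dict.getD (PySem.Dict.mk tx) "tags" [])) PySem.Set.empty
  !(PySem.Set.isdisjoint all_tags values)

-- ===== PRECONDITION & SPEC =====
def Spec_check_transaction_tags_py (values : List String) (transactions : List (List (String × List String))) (profile : Option String) (input_data : Option String) (now : Option String) (out : Bool) : Prop := out = check_transaction_tags_py_alt values transactions profile input_data now
instance (values : List String) (transactions : List (List (String × List String))) (profile : Option String) (input_data : Option String) (now : Option String) (out : Bool) : Decidable (Spec_check_transaction_tags_py values transactions profile input_data now out) := by unfold Spec_check_transaction_tags_py; infer_instance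

-- ===== CLAIM (what is proved, stated in full; the proofs are below) =====
def Claim_equal_check_transaction_tags_py : Prop := ∀ (values : List String) (transactions : List (List (String × List String))) (profile : Option String) (input_data : Option String) (now : Option String), Dom_check_transaction_tags_py values transactions profile input_data now → Spec_check_transaction_tags_py values transactions profile input_data now (check_transaction_tags_py values transactions profile input_data now)

-- ===== LEMMAS AND PROOFS =====

-- ===== VERDICT (by name: the statement is the Claim_ definition above) =====
lemma mem_foldl_update {s : PySem.Set String} {txs : List (List (String × List String))} {x : String} :
    (x ∈ txs.foldl (fun s tx => PySem.Set.update s (PySem.Dict.getD (PySem.Dict.mk tx) "tags" [])) s) ↔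
      x ∈ s ∨ ∃ tx ∈ txs, x ∈ PySem.Dict.getD (PySem.Dict.mk tx) "tags" [] := by
  induction txs generalizing s with
  | nil => simp [List.foldl]
  | cons tx rest ih =>
      simp [List.foldl, ih, PySem.Set.mem_update]
      tauto

lemma loopA_iff (values : List String) (txs : List (List (String × List String))) :
    checkTagsLoopA values txs = true ↔
      ∃ tx ∈ txs, ∃ tag ∈ values, tag ∈ PySem.Dict.getD (PySem.Dict.mk tx) "tags" [] := by
  induction txs with
  | nil => simp [checkTagsLoopA]
  | cons tx rest ih =>
      simp only [checkTagsLoopA]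
      split_ifs with h
      · simp only [List.any_eq_true, List.contains_iff_mem] at h
        simp only [List.mem_cons, true_iff]
        exact ⟨tx, Or.inl rfl, h⟩
      · simp only [List.any_eq_true, List.contains_iff_mem] at h
        push_neg at h
        rw [ih]
        constructor
        · rintro ⟨tx', htx', hx⟩; exact ⟨tx', List.mem_cons_of_mem _ htx', hx⟩
        · rintro ⟨tx', htx', tag, htag, hmem⟩
          rcases List.mem_cons.mp htx' with heq | htx'
          · subst heq; exact absurd hmem (h _ htag)
          · exact ⟨tx', htx', tag, htag, hmem⟩

theorem check_transaction_tags_py_spec : Claim_equal_check_transaction_tags_py := by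
  intro values transactions profile input_data now _
  unfold Spec_check_transaction_tags_py check_transaction_tags_py check_transaction_tags_py_alt
  rw [Bool.eq_iff_iff]
  simp only [loopA_iff, Bool.not_eq_eq_eq_not, Bool.not_true, Bool.not_eq_true',
    ← Bool.not_eq_true, PySem.Set.isdisjoint_iff, mem_foldl_update]
  push_neg
  constructor
  · rintro ⟨tx, htx, tag, htag, hmem⟩
    exact ⟨tag, Or.inr ⟨tx, htx, hmem⟩, htag⟩
  · rintro ⟨tag, hin, htag⟩
    rcases hin with h | ⟨tx, htx, hmem⟩
    · simp [PySem.Set.empty] at h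
    · exact ⟨tx, htx, tag, htag, hmem⟩
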